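-- pv_equiv track=rewrite | github.com/galaxyproject/planemo | planemo/galaxy/workflows.py | _find_primary_descriptor
-- ===== SOURCE A (Python) =====
-- from typing import (
--     Any,
--     Callable,
--     Dict,
--     List,
--     Optional,
--     Tuple,
--     TYPE_CHECKING,
-- )
--
-- def _find_primary_descriptor(files: List[Dict[str, Any]]) -> Optional[Dict[str, Any]]:
--     """Find the primary descriptor file from a list of TRS files."""
--     for f in files:
--         if f.get("file_type") == "PRIMARY_DESCRIPTOR":
--             return f
--     for f in files:
--         if f.get("path", "").endswith((".ga", ".gxwf.yml", ".gxwf.yaml")):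
--             return f
--     return files[0] if files else None
-- ===== SOURCE B (Python) =====
-- def _find_primary_descriptor(files):
--     """Find the primary descriptor file from a list of TRS files."""
--     def rank(f):
--         if f.get("file_type") == "PRIMARY_DESCRIPTOR":
--             return 0
--         if f.get("path", "").endswith((".ga", ".gxwf.yml", ".gxwf.yaml")):
--             return 1
--         return 2
--     return min(files, key=rank) if files else None
-- ===== Notes on version B (the rewrite author's own statement) =====
-- stated objective: idiomatic
-- what changed: Replaces A's two sequential scans plus a head fallback by assigning each file a priority rank (0 primary, 1 workflow-suffix path, 2 other) and returning the first minimum via min(files, key=rank).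
import Mathlib
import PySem

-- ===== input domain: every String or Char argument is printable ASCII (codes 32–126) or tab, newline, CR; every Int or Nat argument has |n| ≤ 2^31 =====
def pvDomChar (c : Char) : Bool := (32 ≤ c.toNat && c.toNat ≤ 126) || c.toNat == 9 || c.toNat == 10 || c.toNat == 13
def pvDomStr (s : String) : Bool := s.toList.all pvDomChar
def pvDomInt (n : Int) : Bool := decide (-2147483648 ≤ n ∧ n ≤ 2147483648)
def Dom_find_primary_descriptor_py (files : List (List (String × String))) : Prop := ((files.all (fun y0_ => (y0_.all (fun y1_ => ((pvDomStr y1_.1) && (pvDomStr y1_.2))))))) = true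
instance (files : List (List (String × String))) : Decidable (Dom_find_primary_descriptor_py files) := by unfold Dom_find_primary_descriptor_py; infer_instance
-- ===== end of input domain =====

-- B replaces A's two sequential scans + head fallback by a priority rank (0/1/2) and a stable min(files, key=rank); same result (objective: idiomatic).

-- ===== PORT A =====
-- f.get(k): first-match lookup in the association list (dict under the type convention)
def pvGetKey (f : List (String × String)) (k : String) : Option String :=
  match f with
  | [] => none
  | (k', v) :: rest => if k' == k then some v else pvGetKey rest k

-- f.get("path", "").endswith((".ga", ".gxwf.yml", ".gxwf.yaml"))
def pvPathMatch (f : List (String × String)) : Bool :=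
  let p := (pvGetKey f "path").getD ""
  PySem.Str.endswith p ".ga" || PySem.Str.endswith p ".gxwf.yml" || PySem.Str.endswith p ".gxwf.yaml"

-- first loop of A
def pvScanPrimary (files : List (List (String × String))) : Option (List (String × String)) :=
  match files with
  | [] => none
  | f :: rest => if pvGetKey f "file_type" == some "PRIMARY_DESCRIPTOR" then some f else pvScanPrimary rest

-- second loop of A
def pvScanPath (files : List (List (String × String))) : Option (List (String × String)) :=
  match files with
  | [] => none
  | f :: rest => if pvPathMatch f then some f else pvScanPath rest

def find_primary_descriptor_py (files : List (List (String × String))) : Option (List (String × String)) :=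
  match pvScanPrimary files with
  | some f => some f
  | none =>
    match pvScanPath files with
    | some f => some f
    | none => files.head?

-- ===== PORT B =====
-- the `rank` key of Source B: 0 for a primary descriptor, 1 for a workflow-suffix path, 2 otherwise
def pvRank (f : List (String × String)) : Nat :=
  if pvGetKey f "file_type" == some "PRIMARY_DESCRIPTOR" then 0
  else if pvPathMatch f then 1
  else 2

-- min(files, key=rank) if files else None; PySem.List.min? is Python's min (first minimum) and is none on []
def find_primary_descriptor_py_alt (files : List (List (String × String))) : Option (List (String × String)) :=
  PySem.List.min? files pvRank

-- ===== PRECONDITION & SPEC =====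
def Spec_find_primary_descriptor_py (files : List (List (String × String))) (out : Option (List (String × String))) : Prop := out = find_primary_descriptor_py_alt files
instance (files : List (List (String × String))) (out : Option (List (String × String))) : Decidable (Spec_find_primary_descriptor_py files out) := by unfold Spec_find_primary_descriptor_py; infer_instance

-- ===== CLAIM (what is proved, stated in full; the proofs are below) =====
def Claim_equal_find_primary_descriptor_py : Prop := ∀ (files : List (List (String × String))), Dom_find_primary_descriptor_py files → Spec_find_primary_descriptor_py files (find_primary_descriptor_py files)

-- ===== LEMMAS AND PROOFS =====

-- proof-side name for the first-minimum fold that min? performs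
def pvMinFold (acc : Option (List (String × String))) (files : List (List (String × String))) :
    Option (List (String × String)) :=
  List.foldl
    (fun acc x =>
      match acc with
      | none => some x
      | some b => if pvRank x < pvRank b then some x else some b)
    acc files

theorem pvMinFold_cons (m g : List (String × String)) (t : List (List (String × String))) :
    pvMinFold (some m) (g :: t) = pvMinFold (some (if pvRank g < pvRank m then g else m)) t := by
  by_cases h : pvRank g < pvRank m <;> simp [pvMinFold, h]

-- The running first-minimum fold, started at a current best m, returns: m if m is primary;
-- else the first primary of the rest; else m if m is a path match; else the first path match of the rest; else m.
theorem pvMinFold_eq (rest : List (List (String × String))) (m : List (String × String)) :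
    pvMinFold (some m) rest =
      if pvRank m = 0 then some m
      else
        match pvScanPrimary rest with
        | some g => some g
        | none =>
          if pvRank m = 1 then some m
          else
            match pvScanPath rest with
            | some g => some g
            | none => some m := by
  induction rest generalizing m with
  | nil => split_ifs <;> simp [pvMinFold, pvScanPrimary, pvScanPath]
  | cons g t ih =>
    rw [pvMinFold_cons, ih]
    by_cases hpg : (pvGetKey g "file_type" == some "PRIMARY_DESCRIPTOR") = true <;>
    by_cases hqg : pvPathMatch g = true <;>
    by_cases hpm : (pvGetKey m "file_type" == some "PRIMARY_DESCRIPTOR") = true <;>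
    by_cases hqm : pvPathMatch m = true <;>
      simp [pvRank, pvScanPrimary, pvScanPath, hpg, hqg, hpm, hqm]

-- ===== VERDICT (by name: the statement is the Claim_ definition above) =====
theorem find_primary_descriptor_py_spec : Claim_equal_find_primary_descriptor_py := by
  intro files _
  unfold Spec_find_primary_descriptor_py
  have halt : find_primary_descriptor_py_alt files = pvMinFold none files := by
    unfold find_primary_descriptor_py_alt PySem.List.min? pvMinFold
    congr 1
    funext acc x
    cases acc <;> rfl
  rw [halt]
  cases files with
  | nil => rfl
  | cons f rest =>
    have hstep : pvMinFold none (f :: rest) = pvMinFold (some f) rest := rfl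
    rw [hstep, pvMinFold_eq]
    by_cases hpf : (pvGetKey f "file_type" == some "PRIMARY_DESCRIPTOR") = true <;>
    by_cases hqf : pvPathMatch f = true <;>
      simp [find_primary_descriptor_py, pvRank, pvScanPrimary, pvScanPath, hpf, hqf] <;>
      cases pvScanPrimary rest <;> cases pvScanPath rest <;> simp
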